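-- pv_equiv track=rewrite | github.com/guystern26/Query-Tester | packages/query-tester/stage/bin/analysis/static_analyzer.py | _strip_quoted
-- ===== SOURCE A (Python) =====
-- def _strip_quoted(spl):
--     # type: (str) -> str
--     """Remove content inside single and double quotes to avoid false matches."""
--     result = []  # type: List[str]
--     i = 0
--     while i < len(spl):
--         ch = spl[i]
--         if ch in ('"', "'"):
--             quote = ch
--             i += 1
--             while i < len(spl):
--                 if spl[i] == "\\" and i + 1 < len(spl):
--                     i += 2
--                     continue
--                 if spl[i] == quote:
--                     break
--                 i += 1
--             i += 1
--             continue
--         result.append(ch)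
--         i += 1
--     return "".join(result)
-- ===== SOURCE B (Python) =====
-- def _strip_quoted(spl):
--     # type: (str) -> str
--     """Remove content inside single and double quotes to avoid false matches."""
--     out = []
--     quote = None
--     escaped = False
--     for ch in spl:
--         if escaped:
--             escaped = False
--         elif quote is not None:
--             if ch == "\\":
--                 escaped = True
--             elif ch == quote:
--                 quote = None
--         elif ch in ('"', "'"):
--             quote = ch
--         else:
--             out.append(ch)
--     return "".join(out)
-- ===== Notes on version B (the rewrite author's own statement) =====
-- stated objective: idiomatic
-- what changed: Replaced the index-based outer/inner while loops with a single flat for-loop state machine over the characters, keeping an active-quote variable and an escaped flag instead of scanning ahead for the closing quote.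
import Mathlib
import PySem

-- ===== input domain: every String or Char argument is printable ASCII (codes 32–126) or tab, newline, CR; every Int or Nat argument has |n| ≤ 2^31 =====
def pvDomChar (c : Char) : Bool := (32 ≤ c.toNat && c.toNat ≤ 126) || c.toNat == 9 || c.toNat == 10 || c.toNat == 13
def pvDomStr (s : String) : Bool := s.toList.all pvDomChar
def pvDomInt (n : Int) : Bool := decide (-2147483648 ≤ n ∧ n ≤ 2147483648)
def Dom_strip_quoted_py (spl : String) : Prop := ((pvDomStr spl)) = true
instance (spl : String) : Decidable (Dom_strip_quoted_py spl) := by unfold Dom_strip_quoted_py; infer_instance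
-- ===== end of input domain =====

-- B rewrites A's index-based outer/inner while loops as one flat state-machine pass
-- (active-quote variable + escaped flag); same values, no speed claim.

-- ===== PORT A =====
-- inner while loop of A: starting at index i, scan for the closing `quote`,
-- skipping backslash escapes; returns the index where the loop stops.
def stripA_inner (s : List Char) (quote : Char) (i : Nat) : Nat :=
  if _h : i < s.length then
    if s[i]! = '\\' ∧ i + 1 < s.length then stripA_inner s quote (i + 2)
    else if s[i]! = quote then i
    else stripA_inner s quote (i + 1)
  else i
termination_by s.length - i

-- the inner loop never moves backwards (needed for the outer loop's termination)
theorem stripA_inner_ge (s : List Char) (quote : Char) (i : Nat) :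
    i ≤ stripA_inner s quote i := by
  fun_induction stripA_inner s quote i with
  | case1 i h hb ih => omega
  | case2 i h hb hq => omega
  | case3 i h hb hq ih => omega
  | case4 i h => omega

-- outer while loop of A, accumulating `result`
def stripA_outer (s : List Char) (i : Nat) (result : List Char) : List Char :=
  if _h : i < s.length then
    if s[i]! = '"' ∨ s[i]! = '\'' then
      stripA_outer s (stripA_inner s (s[i]!) (i + 1) + 1) result
    else
      stripA_outer s (i + 1) (result ++ [s[i]!])
  else result
termination_by s.length - i
decreasing_by
  · have := stripA_inner_ge s (s[i]!) (i + 1); omega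
  · omega

def strip_quoted_py (spl : String) : String :=
  String.ofList (stripA_outer spl.toList 0 [])

-- ===== PORT B =====
-- flat state machine: `quote` = active quote character (none when outside),
-- `escaped` = previous char was a backslash inside a quote
def stripB_go : List Char → Option Char → Bool → List Char
  | [], _, _ => []
  | _ :: rest, some q, true => stripB_go rest (some q) false
  | c :: rest, some q, false =>
      if c = '\\' then stripB_go rest (some q) true
      else if c = q then stripB_go rest none false
      else stripB_go rest (some q) false
  | c :: rest, none, _ =>
      if c = '"' ∨ c = '\'' then stripB_go rest (some c) false
      else c :: stripB_go rest none false

def strip_quoted_py_alt (spl : String) : String :=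
  String.ofList (stripB_go spl.toList none false)

-- ===== PRECONDITION & SPEC =====
def Spec_strip_quoted_py (spl : String) (out : String) : Prop := out = strip_quoted_py_alt spl
instance (spl : String) (out : String) : Decidable (Spec_strip_quoted_py spl out) := by unfold Spec_strip_quoted_py; infer_instance

-- ===== CLAIM (what is proved, stated in full; the proofs are below) =====
def Claim_equal_strip_quoted_py : Prop := ∀ (spl : String), Dom_strip_quoted_py spl → Spec_strip_quoted_py spl (strip_quoted_py spl)

-- ===== LEMMAS AND PROOFS =====

-- A's inner quote-scan agrees with B's in-quote state: B consumes exactly the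
-- characters A's inner loop skips, ending right after the closing quote.
theorem inner_eq (s : List Char) (q : Char) (hq : q ≠ '\\') (j : Nat) :
    stripB_go (s.drop j) (some q) false
      = stripB_go (s.drop (stripA_inner s q j + 1)) none false := by
  fun_induction stripA_inner s q j with
  | case1 j h hb ih =>
    -- s[j] = '\\' and j+1 < length: escape, skip two
    obtain ⟨hbs, hlt⟩ := hb
    rw [List.drop_eq_getElem_cons h, List.drop_eq_getElem_cons hlt]
    simp only [List.getElem!_eq_getElem?_getD, List.getElem?_eq_getElem h,
      Option.getD_some] at hbs
    simp [stripB_go, hbs, ih]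
  | case2 j h hb hc =>
    -- s[j] = q: closing quote
    rw [List.drop_eq_getElem_cons h]
    simp only [List.getElem!_eq_getElem?_getD, List.getElem?_eq_getElem h,
      Option.getD_some] at hc
    simp [stripB_go, hc, hq]
  | case3 j h hb hc ih =>
    rw [List.drop_eq_getElem_cons h]
    simp only [List.getElem!_eq_getElem?_getD, List.getElem?_eq_getElem h,
      Option.getD_some] at hc
    by_cases hbs : s[j] = '\\'
    · -- trailing backslash (j+1 = length): B arms escape, then input ends
      have hj1 : s.length ≤ j + 1 := by
        by_contra hlt
        exact hb ⟨by simpa [List.getElem!_eq_getElem?_getD, List.getElem?_eq_getElem h] using hbs,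
          Nat.lt_of_not_le hlt⟩
      have hd1 : s.drop (j + 1) = [] := List.drop_eq_nil_of_le hj1
      have hge := stripA_inner_ge s q (j + 1)
      have hd2 : s.drop (stripA_inner s q (j + 1) + 1) = [] :=
        List.drop_eq_nil_of_le (by omega)
      simp [stripB_go, hbs, hd1, hd2]
    · simp [stripB_go, hbs, hc, ih]
  | case4 j h =>
    have hd1 : s.drop j = [] := List.drop_eq_nil_of_le (by omega)
    have hd2 : s.drop (j + 1) = [] := List.drop_eq_nil_of_le (by omega)
    simp [hd1, hd2, stripB_go]

-- A's outer loop from index i equals `result` followed by B run on the rest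
theorem outer_eq (s : List Char) (i : Nat) (result : List Char) :
    stripA_outer s i result = result ++ stripB_go (s.drop i) none false := by
  fun_induction stripA_outer s i result with
  | case1 i result h hq ih =>
    rw [List.drop_eq_getElem_cons h]
    simp only [List.getElem!_eq_getElem?_getD, List.getElem?_eq_getElem h,
      Option.getD_some] at hq
    have hnb : s[i] ≠ '\\' := by
      rcases hq with hq | hq <;> rw [hq] <;> decide
    have hi := inner_eq s s[i] hnb (i + 1)
    rw [ih, List.getElem!_eq_getElem?_getD, List.getElem?_eq_getElem h,
      Option.getD_some]
    simp [stripB_go, hq, ← hi]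
  | case2 i result h hq ih =>
    rw [List.drop_eq_getElem_cons h]
    simp only [List.getElem!_eq_getElem?_getD, List.getElem?_eq_getElem h,
      Option.getD_some] at hq
    rw [ih]
    simp only [List.getElem!_eq_getElem?_getD, List.getElem?_eq_getElem h,
      Option.getD_some]
    simp [stripB_go, hq]
  | case3 i result h =>
    have hd : s.drop i = [] := List.drop_eq_nil_of_le (by omega)
    simp [hd, stripB_go]

-- ===== VERDICT (by name: the statement is the Claim_ definition above) =====
theorem strip_quoted_py_spec : Claim_equal_strip_quoted_py := by
  intro spl _
  unfold Spec_strip_quoted_py strip_quoted_py strip_quoted_py_alt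
  rw [outer_eq]
  simp
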